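-- pv_equiv track=rewrite | github.com/anggel862/cripto | Practica1/gui.py | subclaves
-- ===== SOURCE A (Python) =====
-- def subclaves(clave, cifrado):
--     listasubclaves = []
--     if(cifrado):
--         rondas = 8
--         for ronda in range(0,rondas):
--             nelem = 0
--             n = 8
--             nelem = 0
--             claveaux=""
--             i = ronda-1
--             while nelem<8:
--                 claveaux = claveaux+clave[(i+1)%9]
--                 i = i+1
--                 nelem = nelem+1
--             listasubclaves.append(claveaux)
--     else:
--         ronda = 7
--         while(ronda>=0):
--             nelem = 0
--             n = 8
--             nelem = 0
--             claveaux=""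
--             i = ronda-1
--             while nelem<8:
--                 claveaux = claveaux+clave[(i+1)%9]
--                 i = i+1
--                 nelem = nelem+1
--             listasubclaves.append(claveaux)
--             ronda = ronda - 1
--     return listasubclaves
-- ===== SOURCE B (Python) =====
-- def subclaves(clave, cifrado):
--     base = ''.join(clave[k] for k in range(9))
--     doubled = base + base
--     subs = [doubled[i:i + 8] for i in range(8)]
--     return subs if cifrado else list(reversed(subs))
-- ===== Notes on version B (the rewrite author's own statement) =====
-- stated objective: simpler
-- what changed: Replaces A's nested counter loops (per-round while loop appending clave[(i+1)%9] character by character) with building the 9-char cyclic base once, doubling it, and taking 8 slice windows, reversing the list when cifrado is false.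
import Mathlib
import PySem

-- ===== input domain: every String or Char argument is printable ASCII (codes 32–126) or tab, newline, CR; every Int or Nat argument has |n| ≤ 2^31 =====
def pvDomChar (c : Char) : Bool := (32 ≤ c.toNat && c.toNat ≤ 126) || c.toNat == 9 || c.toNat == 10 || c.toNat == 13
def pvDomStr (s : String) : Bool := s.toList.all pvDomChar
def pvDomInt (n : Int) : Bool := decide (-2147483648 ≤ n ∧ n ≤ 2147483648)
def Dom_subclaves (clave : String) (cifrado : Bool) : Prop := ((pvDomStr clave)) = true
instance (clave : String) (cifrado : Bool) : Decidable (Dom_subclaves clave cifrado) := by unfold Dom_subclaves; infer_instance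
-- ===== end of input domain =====

-- B builds the 9-char cyclic base once, doubles it and takes 8 slice windows instead of A's
-- per-round character-appending while loops (simpler decomposition; same cost).
-- Both programs raise IndexError when len(clave) < 9; Pre_ excludes exactly those inputs.

-- ===== PORT A =====
-- inner 'while nelem<8' loop: fuel = 8 - nelem, state (i, claveaux)
def pvAInner (cs : List Char) : Nat → Int → List Char → List Char
  | 0, _, acc => acc
  | n+1, i, acc =>
      pvAInner cs n (i+1) (acc ++ [(PySem.List.pyGet? cs (PySem.Int.mod (i+1) 9)).getD ' '])

-- outer 'while ronda>=0' loop of the else-branch (runs at most 8 times from ronda = 7)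
def pvAWhile (cs : List Char) : Nat → Int → List String → List String
  | 0, _, acc => acc
  | f+1, ronda, acc =>
      if ronda ≥ 0 then
        pvAWhile cs f (ronda - 1) (acc ++ [String.ofList (pvAInner cs 8 (ronda - 1) [])])
      else acc

def subclaves (clave : String) (cifrado : Bool) : List String :=
  let cs := clave.toList
  if cifrado then
    (PySem.List.pyRange 0 8 1).foldl
      (fun acc ronda => acc ++ [String.ofList (pvAInner cs 8 (ronda - 1) [])]) []
  else
    pvAWhile cs 8 7 []

-- ===== PORT B =====
def subclaves_alt (clave : String) (cifrado : Bool) : List String :=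
  let cs := clave.toList
  let base := (List.range 9).map (fun k => (PySem.List.pyGet? cs (k : Int)).getD ' ')
  let doubled := base ++ base
  let subs := (List.range 8).map
    (fun i => String.ofList (PySem.List.slice doubled (some (i : Int)) (some ((i : Int) + 8))))
  if cifrado then subs else subs.reverse

-- ===== PRECONDITION & SPEC =====
-- A raises IndexError whenever the key has fewer than 9 characters (so does B); Pre_ excludes exactly those.
def Pre_subclaves (clave : String) (cifrado : Bool) : Prop := 9 ≤ clave.toList.length
instance (clave : String) (cifrado : Bool) : Decidable (Pre_subclaves clave cifrado) := by
  unfold Pre_subclaves; infer_instance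
def pvWitness_subclaves : String × Bool := ("ABCDEFGHI", true)

def Spec_subclaves (clave : String) (cifrado : Bool) (out : List String) : Prop := out = subclaves_alt clave cifrado
instance (clave : String) (cifrado : Bool) (out : List String) : Decidable (Spec_subclaves clave cifrado out) := by unfold Spec_subclaves; infer_instance

-- ===== CLAIM (what is proved, stated in full; the proofs are below) =====
def Claim_equal_subclaves : Prop := ∀ (clave : String) (cifrado : Bool), Dom_subclaves clave cifrado → Pre_subclaves clave cifrado → Spec_subclaves clave cifrado (subclaves clave cifrado)

-- ===== LEMMAS AND PROOFS =====
lemma pvCons9 {α : Type} (l : List α) (h : 9 ≤ l.length) :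
    ∃ b0 b1 b2 b3 b4 b5 b6 b7 b8 t,
      l = b0::b1::b2::b3::b4::b5::b6::b7::b8::t := by
  rcases l with _|⟨b0,l⟩; · simp at h
  rcases l with _|⟨b1,l⟩; · simp at h
  rcases l with _|⟨b2,l⟩; · simp at h
  rcases l with _|⟨b3,l⟩; · simp at h
  rcases l with _|⟨b4,l⟩; · simp at h
  rcases l with _|⟨b5,l⟩; · simp at h
  rcases l with _|⟨b6,l⟩; · simp at h
  rcases l with _|⟨b7,l⟩; · simp at h
  rcases l with _|⟨b8,l⟩; · simp at h
  exact ⟨b0,b1,b2,b3,b4,b5,b6,b7,b8,l,rfl⟩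

-- ===== VERDICT (by name: the statement is the Claim_ definition above) =====
theorem subclaves_spec : Claim_equal_subclaves := by
  intro clave cifrado _ hpre
  unfold Spec_subclaves subclaves subclaves_alt
  obtain ⟨b0,b1,b2,b3,b4,b5,b6,b7,b8,t,hg⟩ := pvCons9 clave.toList hpre
  rw [hg]
  have hr8 : PySem.List.pyRange 0 8 1 = [0,1,2,3,4,5,6,7] := by decide
  cases cifrado <;>
    simp [hr8, pvAInner, pvAWhile, List.range_succ,
      PySem.List.slice, PySem.List.clampIdx]
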